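-- pv_equiv track=rewrite | github.com/bb288/Advent-of-Code | 2023/13 december TODO/Deel 1/AdventOfCode_13122023_1.py | findReflectionsColumns
-- ===== SOURCE A (Python) =====
-- def sameArrays(array1, array2):
--     i = 0
--     while i < len(array1):
--         if array1[i] != array2[i]:
--             return False
--         i += 1
--     return True
--
-- def makeColumn(pattern, columnIndex):
--     column = ""
--     for line in pattern:
--         column += line[columnIndex]
--     return column
--
-- def findReflectionsColumns(pattern):
--     reflections = []
--     columnIndex = 1 # start at the second column and check if they are similar with the one before
--     while columnIndex < len(pattern[0]):
--         if sameArrays(makeColumn(pattern, columnIndex - 1), makeColumn(pattern, columnIndex)):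
--             reflections.append(columnIndex)
--         columnIndex += 1
--     return reflections
-- ===== SOURCE B (Python) =====
-- def findReflectionsColumns(pattern):
--     # Row-wise candidate pruning: no columns are ever built. Start with every
--     # adjacent column index as a candidate, then intersect with each row's
--     # adjacent-equality set, stopping early once no candidate survives.
--     candidates = list(range(1, len(pattern[0])))
--     for row in pattern:
--         candidates = [i for i in candidates if row[i] == row[i - 1]]
--         if not candidates:
--             break
--     return candidates
-- ===== Notes on version B (the rewrite author's own statement) =====
-- stated objective: alternative
-- what changed: B never builds any column: it traverses the grid row by row, maintaining the set of still-viable reflection indices and intersecting it with each row's adjacent-character-equality set, with early exit once the set is empty, whereas A iterates over column indices and rebuilds both adjacent columns character by character for every index.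
import Mathlib
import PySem

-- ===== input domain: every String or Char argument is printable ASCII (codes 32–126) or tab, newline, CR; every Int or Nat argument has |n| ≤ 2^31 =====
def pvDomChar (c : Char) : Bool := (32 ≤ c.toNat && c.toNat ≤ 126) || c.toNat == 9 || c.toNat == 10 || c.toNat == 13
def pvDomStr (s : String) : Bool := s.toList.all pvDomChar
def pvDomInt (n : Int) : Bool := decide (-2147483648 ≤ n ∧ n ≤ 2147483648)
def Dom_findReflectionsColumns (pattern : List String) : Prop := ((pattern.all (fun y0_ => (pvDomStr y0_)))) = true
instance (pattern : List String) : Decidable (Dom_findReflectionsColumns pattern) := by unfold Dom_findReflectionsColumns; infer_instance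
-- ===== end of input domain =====

-- B never builds a column: it sweeps the grid row by row, pruning a candidate set of
-- reflection indices with early exit, instead of A's per-index rebuild of both adjacent
-- columns (alternative algorithm, same worst-case cost).

-- ===== PORT A =====
-- columns are represented as List Char (Python builds them by one-character string concatenation)
def pvSameArraysAux (a b : List Char) (i : Nat) : Bool :=
  if _h : i < a.length then
    if PySem.List.pyGet? a (i : Int) ≠ PySem.List.pyGet? b (i : Int) then false
    else pvSameArraysAux a b (i + 1)
  else true
termination_by a.length - i

def pvSameArrays (a b : List Char) : Bool := pvSameArraysAux a b 0

-- line[columnIndex] raises IndexError when out of range (pyGet? = none); excluded by Pre_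
def pvMakeColumn (pattern : List String) (columnIndex : Int) : List Char :=
  pattern.foldl (fun col line =>
    match PySem.Str.pyGet? line columnIndex with
    | some ch => col ++ [ch]
    | none => col) []

def pvFRCLoop (pattern : List String) (w : Nat) (i : Nat) (acc : List Int) : List Int :=
  if _h : i < w then
    pvFRCLoop pattern w (i + 1)
      (if pvSameArrays (pvMakeColumn pattern ((i : Int) - 1)) (pvMakeColumn pattern (i : Int))
       then acc ++ [(i : Int)] else acc)
  else acc
termination_by w - i

def findReflectionsColumns (pattern : List String) : List Int :=
  pvFRCLoop pattern (((PySem.List.pyGet? pattern 0).getD "").toList.length) 1 []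

-- ===== PORT B =====
-- one pruning step: keep the candidates whose adjacent characters agree in this row
-- (row[i] / row[i-1] in range on every input admitted by Pre_)
def pvPrune (row : String) (cands : List Int) : List Int :=
  cands.filter (fun i => PySem.Str.pyGet? row i == PySem.Str.pyGet? row (i - 1))

-- for row in pattern: candidates = prune; if not candidates: break
def pvBLoop : List String → List Int → List Int
  | [], cands => cands
  | row :: rest, cands =>
      let cands' := pvPrune row cands
      if cands' = [] then cands' else pvBLoop rest cands'

def findReflectionsColumns_alt (pattern : List String) : List Int :=
  pvBLoop pattern
    (PySem.List.pyRange 1 ((((PySem.List.pyGet? pattern 0).getD "").toList.length : Nat) : Int) 1)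

-- ===== PRECONDITION & SPEC =====
-- Pre_ excludes exactly the inputs where Python A raises IndexError: the empty pattern
-- (pattern[0]), and, when there are at least two columns, a row shorter than the first row.
def Pre_findReflectionsColumns (pattern : List String) : Prop :=
  pattern ≠ [] ∧
  (2 ≤ (pattern.headD "").toList.length →
    ∀ line ∈ pattern, (pattern.headD "").toList.length ≤ line.toList.length)
instance (pattern : List String) : Decidable (Pre_findReflectionsColumns pattern) := by
  unfold Pre_findReflectionsColumns; infer_instance

def pvWitness_findReflectionsColumns : List String := ["aab", "aab"]

def Spec_findReflectionsColumns (pattern : List String) (out : List Int) : Prop := out = findReflectionsColumns_alt pattern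
instance (pattern : List String) (out : List Int) : Decidable (Spec_findReflectionsColumns pattern out) := by unfold Spec_findReflectionsColumns; infer_instance

-- ===== CLAIM (what is proved, stated in full; the proofs are below) =====
def Claim_equal_findReflectionsColumns : Prop := ∀ (pattern : List String), Dom_findReflectionsColumns pattern → Pre_findReflectionsColumns pattern → Spec_findReflectionsColumns pattern (findReflectionsColumns pattern)

-- ===== LEMMAS AND PROOFS =====

-- B's loop with early break computes one big filter by the conjunction over all rows
theorem pvBLoop_eq_filter (rows : List String) (cands : List Int) :
    pvBLoop rows cands = cands.filter
      (fun i => rows.all (fun row => PySem.Str.pyGet? row i == PySem.Str.pyGet? row (i - 1))) := by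
  induction rows generalizing cands with
  | nil => simp [pvBLoop]
  | cons r rest ih =>
    show (let cands' := pvPrune r cands;
          if cands' = [] then cands' else pvBLoop rest cands') = _
    simp only [pvPrune]
    have hsplit : cands.filter
        (fun i => (r :: rest).all (fun row => PySem.Str.pyGet? row i == PySem.Str.pyGet? row (i - 1)))
        = (cands.filter (fun i => PySem.Str.pyGet? r i == PySem.Str.pyGet? r (i - 1))).filter
            (fun i => rest.all (fun row => PySem.Str.pyGet? row i == PySem.Str.pyGet? row (i - 1))) := by
      rw [List.filter_filter]
      apply List.filter_congr
      intro i _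
      simp [List.all_cons, Bool.and_comm]
    by_cases hnil : cands.filter (fun i => PySem.Str.pyGet? r i == PySem.Str.pyGet? r (i - 1)) = []
    · rw [if_pos hnil, hnil, hsplit, hnil]; simp
    · simp only [if_neg hnil, ih, hsplit]

-- A's column-building foldl appends one character per row
theorem pvFoldl_col (pattern : List String) (c : Nat)
    (h : ∀ line ∈ pattern, c < line.toList.length) (acc : List Char) :
    pattern.foldl (fun col line =>
      match PySem.Str.pyGet? line (c : Int) with
      | some ch => col ++ [ch]
      | none => col) acc = acc ++ pattern.map (fun line => line.toList.getD c ' ') := by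
  induction pattern generalizing acc with
  | nil => simp
  | cons hd tl ih =>
    have hc : c < hd.toList.length := h hd (by simp)
    have h1 : PySem.Str.pyGet? hd (c : Int) = some hd.toList[c] := by
      simp [List.getElem?_eq_getElem hc]
    rw [List.foldl_cons]
    simp only [h1]
    rw [ih (fun l hl => h l (by simp [hl]))]
    simp [List.getD, List.getElem?_eq_getElem hc]

theorem pvMakeColumn_eq (pattern : List String) (c : Nat)
    (h : ∀ line ∈ pattern, c < line.toList.length) :
    pvMakeColumn pattern (c : Int) = pattern.map (fun line => line.toList.getD c ' ') := by
  unfold pvMakeColumn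
  exact pvFoldl_col pattern c h []

theorem pvSameArraysAux_iff (a b : List Char) (i : Nat) :
    pvSameArraysAux a b i = true ↔ ∀ j, i ≤ j → j < a.length → a[j]? = b[j]? := by
  induction hn : a.length - i using Nat.strong_induction_on generalizing i with
  | _ n ih =>
  rw [pvSameArraysAux]
  by_cases h : i < a.length
  · simp only [h, dif_pos]
    by_cases hne : PySem.List.pyGet? a (i : Int) ≠ PySem.List.pyGet? b (i : Int)
    · simp only [if_pos hne]
      simp only [PySem.List.pyGet?_natCast] at hne
      constructor
      · intro hf; cases hf
      · intro hall; exact absurd (hall i le_rfl h) hne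
    · simp only [if_neg hne]
      simp only [PySem.List.pyGet?_natCast, ne_eq, not_not] at hne
      rw [ih (a.length - (i + 1)) (by omega) (i + 1) rfl]
      constructor
      · intro hall j hij hj
        rcases Nat.eq_or_lt_of_le hij with rfl | hlt
        · exact hne
        · exact hall j hlt hj
      · intro hall j hij hj; exact hall j (Nat.le_of_succ_le hij) hj
  · simp only [h]
    simp only [not_lt] at h
    constructor
    · intro _ j hij hj; omega
    · intro _; rfl

theorem pvSameArrays_eq_beq (a b : List Char) (hl : a.length = b.length) :
    pvSameArrays a b = (a == b) := by
  by_cases heq : a = b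
  · subst heq
    simp only [BEq.rfl]
    rw [pvSameArrays, pvSameArraysAux_iff]
    intro j _ _; rfl
  · have hbeq : (a == b) = false := by simp [heq]
    rw [hbeq, pvSameArrays]
    by_contra hcon
    simp only [Bool.not_eq_false] at hcon
    rw [pvSameArraysAux_iff] at hcon
    apply heq
    apply List.ext_getElem?
    intro j
    by_cases hj : j < a.length
    · exact hcon j (Nat.zero_le _) hj
    · rw [List.getElem?_eq_none (by omega), List.getElem?_eq_none (by omega)]

theorem pvFRCLoop_eq_filter (pattern : List String) (w : Nat) (i : Nat) (acc : List Int) :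
    pvFRCLoop pattern w i acc = acc ++ (PySem.List.pyRange (i : Int) (w : Int) 1).filter
      (fun k => pvSameArrays (pvMakeColumn pattern (k - 1)) (pvMakeColumn pattern k)) := by
  induction hn : w - i using Nat.strong_induction_on generalizing i acc with
  | _ n ih =>
  rw [pvFRCLoop]
  by_cases h : i < w
  · simp only [h, dif_pos]
    rw [PySem.List.pyRange_one_cons (show (i : Int) < (w : Int) by exact_mod_cast h)]
    rw [List.filter_cons]
    rw [ih (w - (i + 1)) (by omega) (i + 1) _ rfl]
    have hcast : ((i + 1 : Nat) : Int) = (i : Int) + 1 := by push_cast; ring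
    rw [hcast]
    by_cases hc : pvSameArrays (pvMakeColumn pattern ((i : Int) - 1)) (pvMakeColumn pattern (i : Int)) = true
    · simp [hc]
    · simp only [Bool.not_eq_true] at hc
      simp [hc]
  · simp only [h, dif_neg, not_false_iff]
    rw [PySem.List.pyRange_one_eq_nil (by exact_mod_cast Nat.le_of_not_lt h)]
    simp

-- equality of two maps over the same list, as Bool
theorem pvBeq_map_eq_all (l : List String) (f g : String → Char) :
    (l.map f == l.map g) = l.all (fun x => f x == g x) := by
  by_cases h : ∀ x ∈ l, f x = g x
  · have h1 : l.map f = l.map g := List.map_congr_left h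
    rw [h1]
    simp only [BEq.rfl]
    symm
    rw [List.all_eq_true]
    intro x hx
    simp [h x hx]
  · have h1 : l.map f ≠ l.map g := by
      intro hmap
      exact h (by rwa [List.map_inj_left] at hmap)
    have h2 : (l.map f == l.map g) = false := by simp [h1]
    rw [h2]
    symm
    rw [List.all_eq_false]
    rw [not_forall] at h
    obtain ⟨x, hx⟩ := h
    rw [Classical.not_imp] at hx
    obtain ⟨hxm, hne⟩ := hx
    exact ⟨x, hxm, by simp [hne]⟩

-- Bool-valued congruence for List.all over the same list
theorem pvAll_congr (l : List String) (p q : String → Bool) (h : ∀ x ∈ l, p x = q x) :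
    l.all p = l.all q := by
  induction l with
  | nil => rfl
  | cons a t ih =>
    simp only [List.all_cons, h a (by simp), ih (fun x hx => h x (by simp [hx]))]

-- ===== VERDICT (by name: the statement is the Claim_ definition above) =====
theorem findReflectionsColumns_spec : Claim_equal_findReflectionsColumns := by
  intro pattern _hdom hpre
  obtain ⟨hne, hlen⟩ := hpre
  obtain ⟨hd, tl, rfl⟩ := List.exists_cons_of_ne_nil hne
  unfold Spec_findReflectionsColumns findReflectionsColumns findReflectionsColumns_alt
  have h0 : (PySem.List.pyGet? (hd :: tl) 0).getD "" = hd := by simp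
  rw [h0]
  set w := hd.toList.length with hw
  simp only [List.headD_cons] at hlen
  rw [pvFRCLoop_eq_filter, pvBLoop_eq_filter, List.nil_append]
  by_cases hsmall : w < 2
  · have hw1 : (w : Int) ≤ 1 := by exact_mod_cast (by omega : w ≤ 1)
    rw [show ((1 : Nat) : Int) = (1 : Int) by norm_num]
    rw [PySem.List.pyRange_one_eq_nil hw1]
    simp
  · have hlen' : ∀ line ∈ hd :: tl, w ≤ line.toList.length := hlen (by omega)
    apply List.filter_congr
    intro k hk
    rw [PySem.List.mem_pyRange_one] at hk
    obtain ⟨hk1, hk2⟩ := hk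
    set kn := k.toNat with hkn
    have hkeq : k = (kn : Int) := by omega
    have hkn1 : 1 ≤ kn := by omega
    have hknw : kn < w := by omega
    have hcl : ∀ c : Nat, c < w → ∀ line ∈ hd :: tl, c < line.toList.length :=
      fun c hc l hl => lt_of_lt_of_le hc (hlen' l hl)
    -- A's predicate: column equality
    rw [hkeq, show (kn : Int) - 1 = ((kn - 1 : Nat) : Int) by omega]
    rw [pvMakeColumn_eq _ _ (hcl kn hknw), pvMakeColumn_eq _ _ (hcl (kn - 1) (by omega))]
    rw [pvSameArrays_eq_beq _ _ (by simp)]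
    rw [pvBeq_map_eq_all]
    -- B's predicate: per-row character equality
    refine pvAll_congr _ _ _ fun line hline => ?_
    have hk2' : kn < line.toList.length := hcl kn hknw line hline
    have hk1' : kn - 1 < line.toList.length := hcl (kn - 1) (by omega) line hline
    have hA : PySem.Str.pyGet? line ((kn : Nat) : Int) = some line.toList[kn] := by
      simp [List.getElem?_eq_getElem hk2']
    have hB : PySem.Str.pyGet? line (((kn - 1 : Nat) : Nat) : Int) = some line.toList[kn - 1] := by
      simp [List.getElem?_eq_getElem hk1']
    rw [hA, hB]
    simp only [List.getD, List.getElem?_eq_getElem hk2', List.getElem?_eq_getElem hk1',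
      Option.getD_some, Option.some_beq_some]
    rw [Bool.eq_iff_iff, beq_iff_eq, beq_iff_eq]
    exact eq_comm
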